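-- pv_equiv track=rewrite | github.com/Arnie016/erdos170 | scripts/fairness_sim.py | build_cyclic_block
-- ===== SOURCE A (Python) =====
-- from typing import Dict, Iterable, List, Sequence, Tuple
--
-- def build_cyclic_block(m: int, k: int) -> List[int]:
--     block = [0]
--     diff_counts = [0] * m
--     while len(block) < k:
--         best = None
--         best_key = None
--         for candidate in range(1, m):
--             if candidate in block:
--                 continue
--             updated = diff_counts[:]
--             for existing in block:
--                 diff = (candidate - existing) % m
--                 if diff != 0:
--                     updated[diff] += 1
--             max_count = max(updated)
--             sum_sq = sum(c * c for c in updated)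
--             key = (max_count, sum_sq, candidate)
--             if best_key is None or key < best_key:
--                 best_key = key
--                 best = candidate
--         if best is None:
--             break
--         for existing in block:
--             diff = (best - existing) % m
--             if diff != 0:
--                 diff_counts[diff] += 1
--         block.append(best)
--     return block
-- ===== SOURCE B (Python) =====
-- from typing import List
--
--
-- def build_cyclic_block(m: int, k: int) -> List[int]:
--     # Incremental greedy (alternative formulation): instead of copying diff_counts and rescanning all m
--     # counters per candidate, keep base max / sum-of-squares once per round and
--     # fold in only the <= len(block) counters a candidate would bump (block
--     # residues are distinct, so each bumped difference is bumped exactly once).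
--     block = [0]
--     in_block = {0}
--     diff_counts = [0] * m
--     while len(block) < k:
--         base_max = max(diff_counts, default=0)
--         base_sq = sum(c * c for c in diff_counts)
--         best = None
--         best_key = None
--         for candidate in range(1, m):
--             if candidate in in_block:
--                 continue
--             mx = base_max
--             sq = base_sq
--             for existing in block:
--                 c = diff_counts[(candidate - existing) % m] + 1
--                 if c > mx:
--                     mx = c
--                 sq += 2 * c - 1
--             key = (mx, sq, candidate)
--             if best_key is None or key < best_key:
--                 best_key = key
--                 best = candidate
--         if best is None:
--             break
--         for existing in block:
--             diff_counts[(best - existing) % m] += 1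
--         block.append(best)
--         in_block.add(best)
--     return block
-- ===== Notes on version B (the rewrite author's own statement) =====
-- stated objective: alternative
-- what changed: Per candidate, B no longer copies the m-entry diff_counts array and rescans it for max/sum-of-squares; it precomputes the base max and sum of squares once per round and folds in only the <= |block| counters the candidate would bump (bumped differences are pairwise distinct), with a set for the membership test (intended as faster; a timing run measured 1.79x at the largest size both finished but could not confirm it).
import Mathlib
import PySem

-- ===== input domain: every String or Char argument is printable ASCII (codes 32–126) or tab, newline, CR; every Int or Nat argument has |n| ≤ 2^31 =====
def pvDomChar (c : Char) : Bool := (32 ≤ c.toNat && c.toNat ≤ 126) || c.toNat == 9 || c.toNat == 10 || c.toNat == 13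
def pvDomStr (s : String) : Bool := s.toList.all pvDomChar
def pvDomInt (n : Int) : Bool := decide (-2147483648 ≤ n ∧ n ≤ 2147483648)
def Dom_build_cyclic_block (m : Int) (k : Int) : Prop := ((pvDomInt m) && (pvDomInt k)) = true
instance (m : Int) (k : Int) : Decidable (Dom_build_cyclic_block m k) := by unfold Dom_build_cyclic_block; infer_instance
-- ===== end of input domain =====

-- B replaces A's per-candidate array copy + full rescan for max/sum-of-squares by an
-- incremental fold over only the counters a candidate bumps (objective: alternative;
-- the equivalence below is about the return value).

-- Python tuple comparison key < best_key on (int, int, int), shared by both ports.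
def pvKeyLt (a b : Int × Int × Int) : Bool :=
  decide (a.1 < b.1) ||
    (a.1 == b.1 && (decide (a.2.1 < b.2.1) || (a.2.1 == b.2.1 && decide (a.2.2 < b.2.2))))

-- ===== PORT A =====
-- A's 'for existing in block: diff = (c-existing)%m; if diff != 0: u[diff] += 1'
-- (the same code appears twice in A: building 'updated' and committing into diff_counts).
-- Indexing uses the total pyGetD/pySetD forms: whenever this code runs, 0 ≤ diff < m = len u,
-- so Python never raises here.
def pvAUpd (m : Int) (block : List Int) (u : List Int) (c : Int) : List Int :=
  block.foldl (fun u e =>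
    let d := PySem.Int.mod (c - e) m
    if d ≠ 0 then PySem.List.pySetD u d (PySem.List.pyGetD u d 0 + 1) else u) u

-- A's inner candidate loop: returns (best, best_key).  max(updated) is evaluated only with
-- updated nonempty (candidates exist only when m ≥ 2), so the .getD 0 default is never used.
def pvASelect (m : Int) (block : List Int) (dc : List Int) :
    Option Int × Option (Int × Int × Int) :=
  (PySem.List.pyRange 1 m 1).foldl (fun st c =>
    if block.contains c then st
    else
      let u := pvAUpd m block dc c
      let mx := (PySem.List.max? u (fun x => x)).getD 0
      let sq := u.foldl (fun s x => s + x * x) 0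
      let key := (mx, sq, c)
      match st.2 with
      | none => (some c, some key)
      | some bk => if pvKeyLt key bk then (some c, some key) else st)
    (none, none)

-- A's while loop; fuel k.toNat suffices: block starts at length 1 and grows by 1 per iteration,
-- and the loop stops as soon as len(block) ≥ k (or no candidate is left).
def pvALoop (m : Int) (k : Int) : Nat → List Int → List Int → List Int
  | 0, block, _ => block
  | fuel + 1, block, dc =>
    if (block.length : Int) < k then
      match (pvASelect m block dc).1 with
      | none => block
      | some b => pvALoop m k fuel (block ++ [b]) (pvAUpd m block dc b)
    else block

def build_cyclic_block (m : Int) (k : Int) : List Int :=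
  pvALoop m k k.toNat [0] (List.replicate m.toNat 0)

-- ===== PORT B =====
-- B's inner loop over the block: running (mx, sq) from the base values.
def pvBKey (m : Int) (block : List Int) (dc : List Int) (baseMx baseSq c : Int) :
    Int × Int × Int :=
  let p := block.foldl (fun (p : Int × Int) e =>
    let cnt := PySem.List.pyGetD dc (PySem.Int.mod (c - e) m) 0 + 1
    (if p.1 < cnt then cnt else p.1, p.2 + 2 * cnt - 1)) (baseMx, baseSq)
  (p.1, p.2, c)

-- B's candidate loop; base_max = max(diff_counts, default=0), base_sq computed once per round.
def pvBSelect (m : Int) (inb : PySem.Set Int) (block : List Int) (dc : List Int) :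
    Option Int × Option (Int × Int × Int) :=
  let baseMx := PySem.List.maxD dc (fun x => x) 0
  let baseSq := dc.foldl (fun s x => s + x * x) 0
  (PySem.List.pyRange 1 m 1).foldl (fun st c =>
    if inb.contains c then st
    else
      let key := pvBKey m block dc baseMx baseSq c
      match st.2 with
      | none => (some c, some key)
      | some bk => if pvKeyLt key bk then (some c, some key) else st)
    (none, none)

-- B's commit loop: diff_counts[(best - existing) % m] += 1 (no diff != 0 test).
def pvBCommit (m : Int) (block : List Int) (dc : List Int) (b : Int) : List Int :=
  block.foldl (fun u e =>
    let d := PySem.Int.mod (b - e) m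
    PySem.List.pySetD u d (PySem.List.pyGetD u d 0 + 1)) dc

def pvBLoop (m : Int) (k : Int) : Nat → List Int → PySem.Set Int → List Int → List Int
  | 0, block, _, _ => block
  | fuel + 1, block, inb, dc =>
    if (block.length : Int) < k then
      match (pvBSelect m inb block dc).1 with
      | none => block
      | some b => pvBLoop m k fuel (block ++ [b]) (inb.add b) (pvBCommit m block dc b)
    else block

def build_cyclic_block_alt (m : Int) (k : Int) : List Int :=
  pvBLoop m k k.toNat [0] (PySem.Set.ofList [0]) (List.replicate m.toNat 0)

-- ===== PRECONDITION & SPEC =====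
def Spec_build_cyclic_block (m : Int) (k : Int) (out : List Int) : Prop := out = build_cyclic_block_alt m k
instance (m : Int) (k : Int) (out : List Int) : Decidable (Spec_build_cyclic_block m k out) := by unfold Spec_build_cyclic_block; infer_instance

-- ===== CLAIM (what is proved, stated in full; the proofs are below) =====
def Claim_equal_build_cyclic_block : Prop := ∀ (m : Int) (k : Int), Dom_build_cyclic_block m k → Spec_build_cyclic_block m k (build_cyclic_block m k)


-- ===== LEMMAS AND PROOFS =====

-- An integer multiple of m strictly between -m and m is 0.
lemma pv_dvd_zero {m d : Int} (h : m ∣ d) (h2 : d < m) (h3 : -m < d) : d = 0 := by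
  rcases h with ⟨t, rfl⟩
  rcases lt_trichotomy t 0 with h4 | rfl | h4
  · nlinarith
  · ring
  · nlinarith

-- The difference (c - e) % m is nonzero for distinct residues c, e in [0, m).
lemma pv_mod_ne {m c e : Int} (hm : 0 < m) (he0 : 0 ≤ e) (hem : e < m)
    (hc0 : 0 ≤ c) (hcm : c < m) (hne : c ≠ e) : PySem.Int.mod (c - e) m ≠ 0 := by
  intro h
  have hd := (PySem.Int.mod_eq_zero_iff_dvd _ _).mp h
  have := pv_dvd_zero hd (by omega) (by omega)
  omega

-- e ↦ (c - e) % m is injective on residues in [0, m).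
lemma pv_mod_inj {m c e1 e2 : Int} (hm : 0 < m) (h10 : 0 ≤ e1) (h1m : e1 < m)
    (h20 : 0 ≤ e2) (h2m : e2 < m)
    (h : PySem.Int.mod (c - e1) m = PySem.Int.mod (c - e2) m) : e1 = e2 := by
  rw [PySem.Int.mod_eq_emod_of_pos hm, PySem.Int.mod_eq_emod_of_pos hm] at h
  have h0 := Int.emod_eq_emod_iff_emod_sub_eq_zero.mp h
  have hd := Int.dvd_of_emod_eq_zero h0
  have he : c - e1 - (c - e2) = e2 - e1 := by ring
  rw [he] at hd
  have := pv_dvd_zero hd (by omega) (by omega)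
  omega

lemma pv_foldl_max_shift : ∀ (t : List Int) (a b : Int),
    t.foldl max (max a b) = max (t.foldl max a) b := by
  intro t
  induction t with
  | nil => intro a b; rfl
  | cons x t ih =>
    intro a b
    simp only [List.foldl_cons]
    rw [max_right_comm a b x, ih]

lemma pv_foldl_sq_shift : ∀ (t : List Int) (a b : Int),
    t.foldl (fun s x => s + x * x) (a + b) = t.foldl (fun s x => s + x * x) a + b := by
  intro t
  induction t with
  | nil => intro a b; rfl
  | cons x t ih =>
    intro a b
    simp only [List.foldl_cons]
    have : a + b + x * x = a + x * x + b := by ring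
    rw [this, ih]

lemma pv_foldl_max_set : ∀ (u : List Int) (n : Nat) (a : Int), n < u.length →
    (u.set n (u.getD n 0 + 1)).foldl max a = max (u.foldl max a) (u.getD n 0 + 1) := by
  intro u
  induction u with
  | nil => intro n a h; simp at h
  | cons x t ih =>
    intro n a h
    cases n with
    | zero =>
      simp only [List.set_cons_zero, List.getD_cons_zero, List.foldl_cons]
      have h1 : max a (x + 1) = max (max a x) (x + 1) := by
        rw [max_assoc, max_eq_right (by omega : x ≤ x + 1)]
      rw [h1, pv_foldl_max_shift, pv_foldl_max_shift]
    | succ j =>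
      simp only [List.set_cons_succ, List.getD_cons_succ, List.foldl_cons]
      exact ih j (max a x) (by simpa using h)

lemma pv_foldl_sq_set : ∀ (u : List Int) (n : Nat) (a : Int), n < u.length →
    (u.set n (u.getD n 0 + 1)).foldl (fun s x => s + x * x) a
      = u.foldl (fun s x => s + x * x) a + 2 * (u.getD n 0 + 1) - 1 := by
  intro u
  induction u with
  | nil => intro n a h; simp at h
  | cons x t ih =>
    intro n a h
    cases n with
    | zero =>
      simp only [List.set_cons_zero, List.getD_cons_zero, List.foldl_cons]
      have h1 : a + (x + 1) * (x + 1) = a + x * x + (2 * (x + 1) - 1) := by ring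
      rw [h1, pv_foldl_sq_shift]
      ring
    | succ j =>
      simp only [List.set_cons_succ, List.getD_cons_succ, List.foldl_cons]
      exact ih j (a + x * x) (by simpa using h)

-- max(updated) after bumping one in-range entry by 1.
lemma pv_max_set (u : List Int) (n : Nat) (hn : n < u.length) :
    (PySem.List.max? (u.set n (u.getD n 0 + 1)) (fun x => x)).getD 0
      = max ((PySem.List.max? u (fun x => x)).getD 0) (u.getD n 0 + 1) := by
  cases u with
  | nil => simp at hn
  | cons x t =>
    cases n with
    | zero =>
      simp only [List.set_cons_zero, List.getD_cons_zero]
      rw [PySem.List.max?_id_cons, PySem.List.max?_id_cons]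
      simp only [Option.getD_some]
      have h1 : (x + 1 : Int) = max x (x + 1) := (max_eq_right (by omega)).symm
      calc t.foldl max (x + 1) = t.foldl max (max x (x + 1)) := by rw [← h1]
        _ = max (t.foldl max x) (x + 1) := pv_foldl_max_shift t x (x + 1)
    | succ j =>
      simp only [List.set_cons_succ, List.getD_cons_succ]
      rw [PySem.List.max?_id_cons, PySem.List.max?_id_cons]
      simp only [Option.getD_some]
      exact pv_foldl_max_set t j x (by simpa using hn)

-- Core: B's running (max, sum_sq) over the block equals A's max/sum_sq of the bumped copy,
-- provided the bumped positions are in range, still untouched, and pairwise distinct.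
lemma pv_core (m c : Int) (dc : List Int) :
    ∀ (bl u : List Int) (z : Int), u ≠ [] →
    (∀ e ∈ bl, 0 ≤ PySem.Int.mod (c - e) m ∧ PySem.Int.mod (c - e) m < (u.length : Int)) →
    (∀ e ∈ bl, PySem.List.pyGetD u (PySem.Int.mod (c - e) m) 0
        = PySem.List.pyGetD dc (PySem.Int.mod (c - e) m) 0) →
    List.Pairwise (fun e1 e2 => PySem.Int.mod (c - e1) m ≠ PySem.Int.mod (c - e2) m) bl →
    bl.foldl (fun (p : Int × Int) e =>
        let cnt := PySem.List.pyGetD dc (PySem.Int.mod (c - e) m) 0 + 1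
        (if p.1 < cnt then cnt else p.1, p.2 + 2 * cnt - 1))
      ((PySem.List.max? u (fun x => x)).getD 0, u.foldl (fun s x => s + x * x) z)
    = ((PySem.List.max? (bl.foldl (fun u e =>
          let d := PySem.Int.mod (c - e) m
          PySem.List.pySetD u d (PySem.List.pyGetD u d 0 + 1)) u) (fun x => x)).getD 0,
       (bl.foldl (fun u e =>
          let d := PySem.Int.mod (c - e) m
          PySem.List.pySetD u d (PySem.List.pyGetD u d 0 + 1)) u).foldl (fun s x => s + x * x) z) := by
  intro bl
  induction bl with
  | nil => intro u z _ _ _ _; rfl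
  | cons e bl ih =>
    intro u z hu hb hut hpw
    obtain ⟨hd0, hdlen⟩ := hb e (by simp)
    have hget : PySem.List.pyGetD u (PySem.Int.mod (c - e) m) 0
        = u.getD (PySem.Int.mod (c - e) m).toNat 0 := by
      rw [PySem.List.pyGetD_eq_getElem u 0 hd0 hdlen, List.getD_eq_getElem]
    set d := PySem.Int.mod (c - e) m with hd
    have hlt : d.toNat < u.length := by omega
    have hu1 : PySem.List.pySetD u d (PySem.List.pyGetD u d 0 + 1)
        = u.set d.toNat (u.getD d.toNat 0 + 1) := by
      rw [PySem.List.pySetD_of_nonneg u _ hd0, hget]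
    simp only [List.foldl_cons]
    have hcnt : PySem.List.pyGetD dc d 0 + 1 = u.getD d.toNat 0 + 1 := by
      rw [← hut e (by simp), hget]
    have hmaxif : ∀ (a b : Int), (if a < b then b else a) = max a b := by
      intro a b
      split_ifs with h
      · exact (max_eq_right h.le).symm
      · exact (max_eq_left (not_lt.1 h)).symm
    rw [hcnt, hmaxif, ← pv_max_set u d.toNat hlt, ← pv_foldl_sq_set u d.toNat z hlt, hu1]
    apply ih
    · exact List.ne_nil_of_length_pos (by simp [List.length_set]; omega)
    · intro e' he'
      obtain ⟨h1, h2⟩ := hb e' (by simp [he'])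
      exact ⟨h1, by simpa [List.length_set] using h2⟩
    · intro e' he'
      obtain ⟨h1, h2⟩ := hb e' (by simp [he'])
      have hne : PySem.Int.mod (c - e) m ≠ PySem.Int.mod (c - e') m :=
        (List.pairwise_cons.mp hpw).1 e' he'
      have hne' : d.toNat ≠ (PySem.Int.mod (c - e') m).toNat := by
        rw [hd]; omega
      have h2' : PySem.Int.mod (c - e') m < ((u.set d.toNat (u.getD d.toNat 0 + 1)).length : Int) := by
        simpa [List.length_set] using h2
      rw [PySem.List.pyGetD_eq_getElem _ 0 h1 h2', List.getElem_set_ne (by omega),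
        ← PySem.List.pyGetD_eq_getElem u 0 h1 h2]
      exact hut e' (by simp [he'])
    · exact (List.pairwise_cons.mp hpw).2

-- A's guarded bump loop is the unguarded one when c is a residue outside the block.
lemma pv_aupd_unguarded (m : Int) (block : List Int) (c : Int) (hm : 0 < m)
    (hbl : ∀ e ∈ block, 0 ≤ e ∧ e < m) (hc0 : 0 ≤ c) (hcm : c < m) (hcb : c ∉ block) :
    ∀ u, pvAUpd m block u c = block.foldl (fun u e =>
        let d := PySem.Int.mod (c - e) m
        PySem.List.pySetD u d (PySem.List.pyGetD u d 0 + 1)) u := by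
  intro u
  unfold pvAUpd
  apply PySem.List.foldl_congr_mem
  intro acc e he
  obtain ⟨h1, h2⟩ := hbl e he
  have hne : c ≠ e := fun h => hcb (h ▸ he)
  simp only [if_pos (pv_mod_ne hm h1 h2 hc0 hcm hne)]

-- Bump folds preserve the length.
lemma pv_fold_len (c m : Int) : ∀ (bl u : List Int),
    (bl.foldl (fun u e =>
        let d := PySem.Int.mod (c - e) m
        PySem.List.pySetD u d (PySem.List.pyGetD u d 0 + 1)) u).length = u.length := by
  intro bl
  induction bl with
  | nil => intro u; rfl
  | cons e bl ih =>
    intro u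
    simp only [List.foldl_cons]
    rw [ih, PySem.List.length_pySetD]

-- The two candidate loops compute the same (best, best_key) pair.
lemma pv_select_eq (m : Int) (inb : PySem.Set Int) (block dc : List Int)
    (hlen : dc.length = m.toNat)
    (hbl : ∀ e ∈ block, 0 ≤ e ∧ (e = 0 ∨ e < m)) (hnd : block.Nodup)
    (hset : ∀ x : Int, x ∈ inb ↔ x ∈ block) :
    pvASelect m block dc = pvBSelect m inb block dc := by
  unfold pvASelect pvBSelect
  apply PySem.List.foldl_congr_mem
  intro st c hc
  have hcr := PySem.List.mem_pyRange_one.mp hc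
  have hm : 2 ≤ m := by omega
  have hbl' : ∀ e ∈ block, 0 ≤ e ∧ e < m := by
    intro e he; obtain ⟨h1, h2⟩ := hbl e he; omega
  have hcontains : inb.contains c = block.contains c := by
    by_cases h : c ∈ block
    · rw [List.contains_iff_mem.mpr h, (PySem.Set.contains_iff inb c).mpr ((hset c).mpr h)]
    · have h' : c ∉ inb := fun hx => h ((hset c).mp hx)
      have hb : block.contains c = false := by
        simpa using mt List.contains_iff_mem.mp h
      have hi : inb.contains c = false := by
        simpa using mt (PySem.Set.contains_iff inb c).mp h'
      rw [hb, hi]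
  rw [hcontains]
  by_cases hmem : c ∈ block
  · rw [List.contains_iff_mem.mpr hmem]
    simp
  · have hcon : block.contains c = false := by
      simp [List.contains_iff_mem, hmem]
    simp only [hcon, Bool.false_eq_true, if_false]
    -- the keys agree
    have hdc : dc ≠ [] := by
      intro h; rw [h] at hlen; simp at hlen; omega
    have hmaxD : PySem.List.maxD dc (fun x => x) 0 = (PySem.List.max? dc (fun x => x)).getD 0 := by
      cases dc with
      | nil => simp at hdc
      | cons x t => simp [PySem.List.maxD]
    have hkey : pvBKey m block dc (PySem.List.maxD dc (fun x => x) 0)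
          (dc.foldl (fun s x => s + x * x) 0) c
        = ((PySem.List.max? (pvAUpd m block dc c) (fun x => x)).getD 0,
           (pvAUpd m block dc c).foldl (fun s x => s + x * x) 0, c) := by
      unfold pvBKey
      rw [hmaxD]
      have hcore := pv_core m c dc block dc 0 hdc
        (by
          intro e he
          constructor
          · exact PySem.Int.mod_nonneg _ (by omega)
          · have := PySem.Int.mod_lt (c - e) (show (0:Int) < m by omega)
            omega)
        (fun e _ => rfl)
        (by
          refine hnd.imp_of_mem ?_
          intro a b ha hb hne h
          obtain ⟨ha1, ha2⟩ := hbl' a ha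
          obtain ⟨hb1, hb2⟩ := hbl' b hb
          exact hne (pv_mod_inj (by omega) ha1 ha2 hb1 hb2 h))
      rw [hcore, pv_aupd_unguarded m block c (by omega) hbl' (by omega) (by omega) hmem dc]
    rw [hkey]
  
-- Any best returned by the candidate loop is a fresh residue in [1, m).
lemma pv_sel_aux (m : Int) (block dc : List Int) :
    ∀ (l : List Int) (st : Option Int × Option (Int × Int × Int)),
    (∀ x ∈ l, 1 ≤ x ∧ x < m) →
    (st.1 = none ∨ ∃ b, st.1 = some b ∧ 1 ≤ b ∧ b < m ∧ b ∉ block) →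
    ((l.foldl (fun st c =>
        if block.contains c then st
        else
          let u := pvAUpd m block dc c
          let mx := (PySem.List.max? u (fun x => x)).getD 0
          let sq := u.foldl (fun s x => s + x * x) 0
          let key := (mx, sq, c)
          match st.2 with
          | none => (some c, some key)
          | some bk => if pvKeyLt key bk then (some c, some key) else st) st).1 = none
      ∨ ∃ b, (l.foldl (fun st c =>
        if block.contains c then st
        else
          let u := pvAUpd m block dc c
          let mx := (PySem.List.max? u (fun x => x)).getD 0
          let sq := u.foldl (fun s x => s + x * x) 0
          let key := (mx, sq, c)
          match st.2 with
          | none => (some c, some key)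
          | some bk => if pvKeyLt key bk then (some c, some key) else st) st).1 = some b
          ∧ 1 ≤ b ∧ b < m ∧ b ∉ block) := by
  intro l
  induction l with
  | nil => intro st hl hst; exact hst
  | cons c l ih =>
    intro st hl hst
    simp only [List.foldl_cons]
    apply ih _ (fun x hx => hl x (by simp [hx]))
    by_cases hcon : block.contains c
    · simp only [hcon, if_true]; exact hst
    · have hcm : c ∉ block := by
        intro h; exact absurd (List.contains_iff_mem.mpr h) (by simpa using hcon)
      obtain ⟨h1, h2⟩ := hl c (by simp)
      simp only [hcon, Bool.false_eq_true, if_false]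
      cases hst2 : st.2 with
      | none => right; exact ⟨c, rfl, h1, h2, hcm⟩
      | some bk =>
        by_cases hlt : pvKeyLt ((PySem.List.max? (pvAUpd m block dc c) (fun x => x)).getD 0,
            (pvAUpd m block dc c).foldl (fun s x => s + x * x) 0, c) bk
        · simp only [hlt, if_true]; right; exact ⟨c, rfl, h1, h2, hcm⟩
        · simp only [hlt, if_false]; exact hst

lemma pv_sel_some (m : Int) (block dc : List Int) {b : Int}
    (h : (pvASelect m block dc).1 = some b) : 1 ≤ b ∧ b < m ∧ b ∉ block := by
  have := pv_sel_aux m block dc (PySem.List.pyRange 1 m 1) (none, none)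
    (fun x hx => PySem.List.mem_pyRange_one.mp hx) (Or.inl rfl)
  unfold pvASelect at h
  rcases this with h' | ⟨b', hb', h1, h2, h3⟩
  · rw [h'] at h; exact absurd h (by simp)
  · rw [hb'] at h
    obtain rfl : b' = b := by injection h
    exact ⟨h1, h2, h3⟩

-- The two commit loops write the same counters.
lemma pv_commit_eq (m : Int) (block dc : List Int) (b : Int) (hm : 0 < m)
    (hbl : ∀ e ∈ block, 0 ≤ e ∧ e < m) (hb0 : 0 ≤ b) (hbm : b < m) (hbb : b ∉ block) :
    pvAUpd m block dc b = pvBCommit m block dc b := by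
  rw [pv_aupd_unguarded m block b hm hbl hb0 hbm hbb dc]
  rfl

-- The main loops agree under the block/counter invariants.
lemma pv_loop_eq (m k : Int) : ∀ (fuel : Nat) (block : List Int) (inb : PySem.Set Int)
    (dc : List Int),
    dc.length = m.toNat →
    (∀ e ∈ block, 0 ≤ e ∧ (e = 0 ∨ e < m)) →
    block.Nodup →
    (∀ x : Int, x ∈ inb ↔ x ∈ block) →
    pvALoop m k fuel block dc = pvBLoop m k fuel block inb dc := by
  intro fuel
  induction fuel with
  | zero => intro block inb dc _ _ _ _; rfl
  | succ fuel ih =>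
    intro block inb dc hlen hbl hnd hset
    unfold pvALoop pvBLoop
    split_ifs with hk
    · rw [pv_select_eq m inb block dc hlen hbl hnd hset]
      cases hsel : (pvBSelect m inb block dc).1 with
      | none => rfl
      | some b =>
        have hsel' : (pvASelect m block dc).1 = some b := by
          rw [pv_select_eq m inb block dc hlen hbl hnd hset]; exact hsel
        obtain ⟨h1, h2, h3⟩ := pv_sel_some m block dc hsel'
        have hbl' : ∀ e ∈ block, 0 ≤ e ∧ e < m := by
          intro e he; obtain ⟨ha, hb'⟩ := hbl e he; omega
        simp only [pv_commit_eq m block dc b (by omega) hbl' (by omega) h2 h3]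
        apply ih
        · unfold pvBCommit
          rw [pv_fold_len b m block dc]
          exact hlen
        · intro e he
          rcases List.mem_append.mp he with he | he
          · exact hbl e he
          · simp at he; subst he; exact ⟨by omega, Or.inr h2⟩
        · simp [List.nodup_append, hnd]
          exact fun a ha hab => h3 (hab ▸ ha)
        · intro x
          rw [PySem.Set.mem_add]
          simp [hset x, List.mem_append]
    · rfl

-- ===== VERDICT (by name: the statement is the Claim_ definition above) =====
theorem build_cyclic_block_spec : Claim_equal_build_cyclic_block := by
  intro m k _
  unfold Spec_build_cyclic_block build_cyclic_block build_cyclic_block_alt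
  apply pv_loop_eq
  · simp
  · intro e he; simp at he; subst he; exact ⟨le_refl 0, Or.inl rfl⟩
  · simp
  · intro x; rw [PySem.Set.mem_ofList]
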